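-- pv_equiv track=rewrite | github.com/Ashiq-am/Data-Structures-Algorithm | 1.Python Algorithms/4.Graph Algoithms/1.Introduction, DFS and BFS/34.Move weighting scale alternate under given constraints/program.py | dfs
-- ===== SOURCE A (Python) =====
-- def dfs(residue, curStep, wt, arr, N, steps):
--     # If we reach to more than required
--     # steps, return true
--     if (curStep >= steps):
--         return True
--
--     # Try all possible weights and choose
--     # one which returns 1 afterwards
--     for i in range(N):
--
--         # Try this weight only if it is greater
--         # than current residueand not same as
--         # previous chosen weight
--         if (arr[i] > residue and
--                 arr[i] != wt[curStep - 1]):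
--
--             # assign this weight to array and
--             # recur for next state
--             wt[curStep] = arr[i]
--             if (dfs(arr[i] - residue, curStep + 1,
--                     wt, arr, N, steps)):
--                 return True
--
--     # if any weight is not possible,
--     # return false
--     return False
-- ===== SOURCE B (Python) =====
-- def dfs(residue, curStep, wt, arr, N, steps):
--     # Iterative depth-first search with an explicit stack of frames.
--     # Each frame is (res, step, i): residue to beat, current step, next
--     # candidate index to try.  Assignments to wt happen in the same order
--     # as the recursive version (no undo on backtrack).
--     if curStep >= steps:
--         return True
--     stack = [(residue, curStep, 0)]
--     while stack:
--         res, step, i = stack.pop()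
--         while i < N:
--             a = arr[i]
--             if a > res and a != wt[step - 1]:
--                 wt[step] = a
--                 stack.append((res, step, i + 1))
--                 if step + 1 >= steps:
--                     return True
--                 stack.append((a - res, step + 1, 0))
--                 break
--             i += 1
--     return False
-- ===== Notes on version B (the rewrite author's own statement) =====
-- stated objective: alternative
-- what changed: The recursive backtracking search is replaced by an iterative depth-first search driven by an explicit stack of (residue, step, next-candidate-index) frames, visiting candidates and writing wt in exactly the same order.
-- outside the precondition, e.g. on dfs(10, 0, [], [1], 1, 3): A returns False, B returns False
import Mathlib
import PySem

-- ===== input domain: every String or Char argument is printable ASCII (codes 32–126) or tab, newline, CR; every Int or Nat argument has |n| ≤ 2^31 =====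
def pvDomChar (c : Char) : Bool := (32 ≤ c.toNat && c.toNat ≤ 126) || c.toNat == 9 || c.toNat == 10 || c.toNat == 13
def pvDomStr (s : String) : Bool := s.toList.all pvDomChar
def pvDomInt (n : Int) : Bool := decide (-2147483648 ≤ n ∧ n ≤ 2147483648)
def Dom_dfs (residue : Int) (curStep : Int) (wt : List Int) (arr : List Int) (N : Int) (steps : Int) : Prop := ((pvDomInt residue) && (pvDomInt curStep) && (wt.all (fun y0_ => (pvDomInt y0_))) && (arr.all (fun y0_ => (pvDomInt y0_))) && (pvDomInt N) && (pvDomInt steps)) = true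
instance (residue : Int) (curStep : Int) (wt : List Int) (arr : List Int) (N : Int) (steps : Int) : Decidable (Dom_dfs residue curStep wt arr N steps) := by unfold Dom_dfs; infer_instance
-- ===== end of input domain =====

-- B replaces the recursive backtracking by an explicit-stack iterative DFS (same candidate
-- order, same writes to wt); equivalence proved about the RETURN value (both versions also
-- mutate wt identically in Python, but only the return value is claimed here).

-- ===== PORT A =====
-- A's recursion always decreases steps - curStep by one and stops as soon as curStep ≥ steps,
-- so fuel (steps - curStep).toNat is exactly its recursion depth; fuel 0 ↔ curStep ≥ steps.
mutual
def dfsAuxA (arr : List Int) (N steps : Int) : Nat → Int → Int → List Int → Bool × List Int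
  | 0, _res, _step, wt => (true, wt)
  | Nat.succ f, res, step, wt => loopA arr N steps f res step (PySem.List.pyRange 0 N 1) wt
termination_by fu _res _step _wt => (fu, 0)

def loopA (arr : List Int) (N steps : Int) (f : Nat) (res step : Int) : List Int → List Int → Bool × List Int
  | [], wt => (false, wt)
  | i :: restc, wt =>
    let a := PySem.List.pyGetD arr i 0
    if a > res ∧ a ≠ PySem.List.pyGetD wt (step - 1) 0 then
      let wt' := PySem.List.pySetD wt step a
      match dfsAuxA arr N steps f (a - res) (step + 1) wt' with
      | (true, wt2) => (true, wt2)
      | (false, wt2) => loopA arr N steps f res step restc wt2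
    else loopA arr N steps f res step restc wt
termination_by cands _wt => (f, cands.length + 1)
end

def dfs (residue : Int) (curStep : Int) (wt : List Int) (arr : List Int) (N : Int) (steps : Int) : Bool :=
  (dfsAuxA arr N steps (steps - curStep).toNat residue curStep wt).1

-- ===== PORT B =====
-- the inner `while i < N` scan for the first acceptable candidate
def scanB (arr : List Int) (res step : Int) (wt : List Int) : List Int → Option (Int × Int)
  | [] => none
  | i :: restc =>
    let a := PySem.List.pyGetD arr i 0
    if a > res ∧ a ≠ PySem.List.pyGetD wt (step - 1) 0 then some (i, a)
    else scanB arr res step wt restc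

-- one iteration of the outer `while stack` loop: pop a frame, scan, push / return
def stepB (arr : List Int) (N steps : Int) :
    (List (Int × Int × Int) × List Int) → (List (Int × Int × Int) × List Int) ⊕ Bool
  | ([], _wt) => Sum.inr false
  | ((res, step, i) :: rest, wt) =>
    match scanB arr res step wt (PySem.List.pyRange i N 1) with
    | none => Sum.inl (rest, wt)
    | some (j, a) =>
      let wt' := PySem.List.pySetD wt step a
      if steps ≤ step + 1 then Sum.inr true
      else Sum.inl ((a - res, step + 1, 0) :: (res, step, j + 1) :: rest, wt')

-- the outer loop, fuelled (the fuel below is a proved upper bound on its iteration count)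
def runB (arr : List Int) (N steps : Int) : Nat → (List (Int × Int × Int) × List Int) → Bool
  | 0, _ => false
  | Nat.succ fl, st =>
    match stepB arr N steps st with
    | Sum.inr b => b
    | Sum.inl st' => runB arr N steps fl st'

-- fuel bound: CcB nn f bounds the iterations of a whole frame at depth-budget f+1,
-- BcB nn f m the iterations of a frame with m candidates left
def CcB (nn : Nat) : Nat → Nat
  | 0 => 1
  | Nat.succ f => 1 + nn * (1 + CcB nn f)

def BcB (nn f m : Nat) : Nat := 1 + m * (1 + CcB nn f)

def dfs_alt (residue : Int) (curStep : Int) (wt : List Int) (arr : List Int) (N : Int) (steps : Int) : Bool :=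
  if steps ≤ curStep then true
  else runB arr N steps (BcB N.toNat ((steps - curStep).toNat - 1) N.toNat + 1)
        ([(residue, curStep, 0)], wt)

-- ===== PRECONDITION & SPEC =====
-- Pre_ excludes inputs where some wt/arr index A touches is out of range (IndexError);
-- on a few such inputs A still returns because every arr[i] ≤ residue makes the search
-- fail before ever touching wt — B returns the same value there (see cites).
def Pre_dfs (residue : Int) (curStep : Int) (wt : List Int) (arr : List Int) (N : Int) (steps : Int) : Prop :=
  steps ≤ curStep ∨
    (0 ≤ N ∧ N ≤ (arr.length : Int) ∧ 1 - (wt.length : Int) ≤ curStep ∧ steps ≤ (wt.length : Int))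
instance (residue : Int) (curStep : Int) (wt : List Int) (arr : List Int) (N : Int) (steps : Int) : Decidable (Pre_dfs residue curStep wt arr N steps) := by unfold Pre_dfs; infer_instance

def pvWitness_dfs : Int × Int × List Int × List Int × Int × Int := (0, 0, [0, 0], [1, 2], 2, 2)

def Spec_dfs (residue : Int) (curStep : Int) (wt : List Int) (arr : List Int) (N : Int) (steps : Int) (out : Bool) : Prop := out = dfs_alt residue curStep wt arr N steps
instance (residue : Int) (curStep : Int) (wt : List Int) (arr : List Int) (N : Int) (steps : Int) (out : Bool) : Decidable (Spec_dfs residue curStep wt arr N steps out) := by unfold Spec_dfs; infer_instance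

-- ===== CLAIM (what is proved, stated in full; the proofs are below) =====
def Claim_equal_dfs : Prop := ∀ (residue : Int) (curStep : Int) (wt : List Int) (arr : List Int) (N : Int) (steps : Int), Dom_dfs residue curStep wt arr N steps → Pre_dfs residue curStep wt arr N steps → Spec_dfs residue curStep wt arr N steps (dfs residue curStep wt arr N steps)

-- ===== LEMMAS AND PROOFS =====

lemma runB_congr (arr : List Int) (N steps : Int) (st1 st2 : List (Int × Int × Int) × List Int)
    (h : stepB arr N steps st1 = stepB arr N steps st2) :
    ∀ fl, runB arr N steps fl st1 = runB arr N steps fl st2 := by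
  intro fl
  cases fl with
  | zero => rfl
  | succ fl => simp [runB, h]

lemma runB_nil (arr : List Int) (N steps : Int) (wt : List Int) :
    ∀ g, runB arr N steps g ([], wt) = false := by
  intro g
  cases g with
  | zero => rfl
  | succ g => simp [runB, stepB]

-- the simulation: one frame of the stack machine computes exactly what A's loop computes,
-- in at most BcB iterations, and leaves the rest of the stack to continue with A's final wt
lemma simB (arr : List Int) (N steps : Int) :
    ∀ (f : Nat) (res step i : Int) (wt : List Int),
      (steps - step).toNat = f + 1 →
      ∃ c, c ≤ BcB N.toNat f (N - i).toNat ∧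
        ∀ (rest : List (Int × Int × Int)) (g : Nat),
          ((loopA arr N steps f res step (PySem.List.pyRange i N 1) wt).1 = true →
            runB arr N steps (c + g + 1) ((res, step, i) :: rest, wt) = true) ∧
          ((loopA arr N steps f res step (PySem.List.pyRange i N 1) wt).1 = false →
            runB arr N steps (c + g) ((res, step, i) :: rest, wt) =
              runB arr N steps g (rest, (loopA arr N steps f res step (PySem.List.pyRange i N 1) wt).2)) := by
  intro f
  induction f using Nat.strong_induction_on with
  | _ f ihf =>
  intro res step i₀ wt₀ h
  have main : ∀ (m : Nat) (i : Int) (wt : List Int), (N - i).toNat = m →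
      ∃ c, c ≤ BcB N.toNat f m ∧
        ∀ (rest : List (Int × Int × Int)) (g : Nat),
          ((loopA arr N steps f res step (PySem.List.pyRange i N 1) wt).1 = true →
            runB arr N steps (c + g + 1) ((res, step, i) :: rest, wt) = true) ∧
          ((loopA arr N steps f res step (PySem.List.pyRange i N 1) wt).1 = false →
            runB arr N steps (c + g) ((res, step, i) :: rest, wt) =
              runB arr N steps g (rest, (loopA arr N steps f res step (PySem.List.pyRange i N 1) wt).2)) := by
    intro m
    induction m with
    | zero =>
      intro i wt hm
      have hiN : N ≤ i := by omega
      have hr : PySem.List.pyRange i N 1 = [] := PySem.List.pyRange_one_eq_nil (by omega)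
      refine ⟨1, by simp [BcB], ?_⟩
      intro rest g
      rw [hr]
      constructor
      · intro hT; simp [loopA] at hT
      · intro _
        have hstep : stepB arr N steps ((res, step, i) :: rest, wt) = Sum.inl (rest, wt) := by
          simp [stepB, hr, scanB]
        simp [loopA]
        calc runB arr N steps (1 + g) ((res, step, i) :: rest, wt)
            = runB arr N steps (g + 1) ((res, step, i) :: rest, wt) := by rw [Nat.add_comm]
          _ = runB arr N steps g (rest, wt) := by simp [runB, hstep]
    | succ m' ihm =>
      intro i wt hm
      by_cases hiN : i < N
      · have hr : PySem.List.pyRange i N 1 = i :: PySem.List.pyRange (i + 1) N 1 :=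
          PySem.List.pyRange_one_cons hiN
        by_cases hcond : PySem.List.pyGetD arr i 0 > res ∧
            PySem.List.pyGetD arr i 0 ≠ PySem.List.pyGetD wt (step - 1) 0
        · -- candidate accepted at index i
          set a := PySem.List.pyGetD arr i 0 with ha
          set wt' := PySem.List.pySetD wt step a with hwt'
          have hscan : scanB arr res step wt (PySem.List.pyRange i N 1) = some (i, a) := by
            rw [hr]; simp only [scanB]; rw [if_pos hcond]
          have hloop : loopA arr N steps f res step (PySem.List.pyRange i N 1) wt =
              (match dfsAuxA arr N steps f (a - res) (step + 1) wt' with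
               | (true, wt2) => (true, wt2)
               | (false, wt2) => loopA arr N steps f res step (PySem.List.pyRange (i + 1) N 1) wt2) := by
            rw [hr]; simp only [loopA]; rw [if_pos hcond]
          cases f with
          | zero =>
            have hss : steps ≤ step + 1 := by omega
            refine ⟨0, by simp [BcB], ?_⟩
            intro rest g
            have hstep : stepB arr N steps ((res, step, i) :: rest, wt) = Sum.inr true := by
              simp [stepB, hscan, hss]
            have hT : (loopA arr N steps 0 res step (PySem.List.pyRange i N 1) wt).1 = true := by
              rw [hloop]; simp [dfsAuxA]
            constructor
            · intro _; simp [runB, hstep]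
            · intro hF; rw [hT] at hF; exact absurd hF (by simp)
          | succ f' =>
            have hss : ¬ steps ≤ step + 1 := by omega
            have hstep : ∀ rest, stepB arr N steps ((res, step, i) :: rest, wt) =
                Sum.inl ((a - res, step + 1, 0) :: (res, step, i + 1) :: rest, wt') := by
              intro rest
              simp [stepB, hscan, hss, hwt']
            have hchild := ihf f' (by omega) (a - res) (step + 1) 0 wt' (by omega)
            obtain ⟨c₁, hc₁, hp₁⟩ := hchild
            have hc₁' : c₁ ≤ CcB N.toNat (f' + 1) := by
              have : BcB N.toNat f' (N - 0).toNat = CcB N.toNat (f' + 1) := by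
                simp [BcB, CcB]
              omega
            have hAeq : dfsAuxA arr N steps (f' + 1) (a - res) (step + 1) wt' =
                loopA arr N steps f' (a - res) (step + 1) (PySem.List.pyRange 0 N 1) wt' := by
              simp [dfsAuxA]
            rcases hA : loopA arr N steps f' (a - res) (step + 1) (PySem.List.pyRange 0 N 1) wt'
              with ⟨b, wt2⟩
            cases b
            · -- child subtree fails: continue with next candidate, wt mutated to wt2
              obtain ⟨c₂, hc₂, hp₂⟩ := ihm (i + 1) wt2 (by omega)
              refine ⟨1 + c₁ + c₂, ?_, ?_⟩
              · have hx : (m' + 1) * (1 + CcB N.toNat (f' + 1)) =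
                    m' * (1 + CcB N.toNat (f' + 1)) + (1 + CcB N.toNat (f' + 1)) := by ring
                simp only [BcB] at hc₂ ⊢
                omega
              · intro rest g
                have hloop2 : loopA arr N steps (f' + 1) res step (PySem.List.pyRange i N 1) wt =
                    loopA arr N steps (f' + 1) res step (PySem.List.pyRange (i + 1) N 1) wt2 := by
                  rw [hloop, hAeq, hA]
                have hrun1 : ∀ X, runB arr N steps (X + 1) ((res, step, i) :: rest, wt) =
                    runB arr N steps X ((a - res, step + 1, 0) :: (res, step, i + 1) :: rest, wt') := by
                  intro X; simp [runB, hstep rest]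
                have hchildrun : ∀ Y, runB arr N steps (c₁ + Y)
                    ((a - res, step + 1, 0) :: (res, step, i + 1) :: rest, wt') =
                    runB arr N steps Y ((res, step, i + 1) :: rest, wt2) := by
                  intro Y
                  have := (hp₁ ((res, step, i + 1) :: rest) Y).2 (by rw [hA])
                  rw [hA] at this
                  exact this
                constructor
                · intro hT
                  rw [hloop2] at hT
                  have h1 : 1 + c₁ + c₂ + g + 1 = (c₁ + (c₂ + g + 1)) + 1 := by omega
                  rw [h1, hrun1, hchildrun]
                  exact (hp₂ rest g).1 hT
                · intro hF
                  rw [hloop2] at hF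
                  have h1 : 1 + c₁ + c₂ + g = (c₁ + (c₂ + g)) + 1 := by omega
                  rw [h1, hrun1, hchildrun, hloop2]
                  exact (hp₂ rest g).2 hF
            · -- child subtree succeeds
              refine ⟨c₁ + 1, ?_, ?_⟩
              · simp only [BcB]
                have h2 : (1 + CcB N.toNat (f' + 1)) ≤ (m' + 1) * (1 + CcB N.toNat (f' + 1)) :=
                  Nat.le_mul_of_pos_left _ (by omega)
                omega
              · intro rest g
                have hT : (loopA arr N steps (f' + 1) res step (PySem.List.pyRange i N 1) wt).1 = true := by
                  rw [hloop, hAeq, hA]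
                constructor
                · intro _
                  have h1 : c₁ + 1 + g + 1 = (c₁ + g + 1) + 1 := by omega
                  rw [h1]
                  have hrun1 : runB arr N steps ((c₁ + g + 1) + 1) ((res, step, i) :: rest, wt) =
                      runB arr N steps (c₁ + g + 1) ((a - res, step + 1, 0) :: (res, step, i + 1) :: rest, wt') := by
                    simp [runB, hstep rest]
                  rw [hrun1]
                  have := (hp₁ ((res, step, i + 1) :: rest) g).1 (by rw [hA])
                  exact this
                · intro hF
                  rw [hT] at hF; exact absurd hF (by simp)
        · -- candidate rejected at index i: identical machine step, A skips to i+1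
          obtain ⟨c, hc, hp⟩ := ihm (i + 1) wt (by omega)
          have hscan : scanB arr res step wt (PySem.List.pyRange i N 1) =
              scanB arr res step wt (PySem.List.pyRange (i + 1) N 1) := by
            rw [hr]; simp only [scanB]; rw [if_neg hcond]
          have hstep : ∀ rest, stepB arr N steps ((res, step, i) :: rest, wt) =
              stepB arr N steps ((res, step, i + 1) :: rest, wt) := by
            intro rest; simp only [stepB, hscan]
          have hloop2 : loopA arr N steps f res step (PySem.List.pyRange i N 1) wt =
              loopA arr N steps f res step (PySem.List.pyRange (i + 1) N 1) wt := by
            rw [hr]; simp only [loopA]; rw [if_neg hcond]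
          refine ⟨c, ?_, ?_⟩
          · have hx : m' * (1 + CcB N.toNat f) ≤ (m' + 1) * (1 + CcB N.toNat f) := by
              apply Nat.mul_le_mul_right; omega
            simp only [BcB] at hc ⊢; omega
          · intro rest g
            have hcongr := runB_congr arr N steps ((res, step, i) :: rest, wt)
              ((res, step, i + 1) :: rest, wt) (hstep rest)
            rw [hloop2]
            constructor
            · intro hT
              rw [hcongr]
              exact (hp rest g).1 hT
            · intro hF
              rw [hcongr]
              exact (hp rest g).2 hF
      · -- i ≥ N despite m = m'+1 (cannot happen only when counts disagree; handle directly)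
        have hr : PySem.List.pyRange i N 1 = [] := PySem.List.pyRange_one_eq_nil (by omega)
        refine ⟨1, by simp [BcB], ?_⟩
        intro rest g
        rw [hr]
        constructor
        · intro hT; simp [loopA] at hT
        · intro _
          have hstep : stepB arr N steps ((res, step, i) :: rest, wt) = Sum.inl (rest, wt) := by
            simp [stepB, hr, scanB]
          simp [loopA]
          calc runB arr N steps (1 + g) ((res, step, i) :: rest, wt)
              = runB arr N steps (g + 1) ((res, step, i) :: rest, wt) := by rw [Nat.add_comm]
            _ = runB arr N steps g (rest, wt) := by simp [runB, hstep]
  exact main (N - i₀).toNat i₀ wt₀ rfl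

-- ===== VERDICT (by name: the statement is the Claim_ definition above) =====
theorem dfs_spec : Claim_equal_dfs := by
  intro residue curStep wt arr N steps _hd _hpre
  unfold Spec_dfs dfs dfs_alt
  by_cases hcs : steps ≤ curStep
  · have h0 : (steps - curStep).toNat = 0 := by omega
    rw [h0, if_pos hcs]
    simp [dfsAuxA]
  · have hf : (steps - curStep).toNat = ((steps - curStep).toNat - 1) + 1 := by omega
    set f := (steps - curStep).toNat - 1 with hfd
    rw [hf, if_neg hcs]
    have hAeq : dfsAuxA arr N steps (f + 1) residue curStep wt =
        loopA arr N steps f residue curStep (PySem.List.pyRange 0 N 1) wt := by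
      simp [dfsAuxA]
    rw [hAeq]
    obtain ⟨c, hc, hp⟩ := simB arr N steps f residue curStep 0 wt (by omega)
    have hcB : c ≤ BcB N.toNat f N.toNat := by
      have : ((N : Int) - 0).toNat = N.toNat := by omega
      rw [this] at hc; exact hc
    set Bd := BcB N.toNat f N.toNat with hBd
    rcases hres : loopA arr N steps f residue curStep (PySem.List.pyRange 0 N 1) wt with ⟨b, wtf⟩
    cases b
    · have hrun := (hp [] (Bd + 1 - c)).2 (by rw [hres])
      rw [hres] at hrun
      have harith : c + (Bd + 1 - c) = Bd + 1 := by omega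
      rw [harith] at hrun
      simp only [hrun, runB_nil]
    · have hrun := (hp [] (Bd - c)).1 (by rw [hres])
      have harith : c + (Bd - c) + 1 = Bd + 1 := by omega
      rw [harith] at hrun
      simp [hrun]
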